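-- pv_equiv track=rewrite | github.com/standardebooks/tools | se/commands/ocr.py | _text_to_xhtml
-- ===== SOURCE A (Python) =====
-- def _text_to_xhtml(raw_text: str, page_num: int) -> str:
-- 	"""Convert Tesseract plain text output to simple XHTML."""
-- 	lines = raw_text.split("\n")
--
-- 	# Group lines into paragraphs (blank lines separate paragraphs)
-- 	paragraphs: list[str] = []
-- 	current: list[str] = []
-- 	for line in lines:
-- 		stripped = line.strip()
-- 		if stripped == "":
-- 			if current:
-- 				paragraphs.append(" ".join(current))
-- 				current = []
-- 		else:
-- 			current.append(stripped)
-- 	if current: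
-- 		paragraphs.append(" ".join(current))
--
-- 	# Build XHTML body
-- 	body_parts = []
-- 	for para in paragraphs:
-- 		# Escape XML entities
-- 		para = para.replace("&", "&amp;").replace("<", "&lt;").replace(">", "&gt;")
-- 		body_parts.append(f"\t\t<p>{para}</p>")
--
-- 	body_html = "\n".join(body_parts)
--
-- 	return f"""<?xml version="1.0" encoding="utf-8"?>
-- <html xmlns="http://www.w3.org/1999/xhtml" xml:lang="en">
-- \t<head>
-- \t\t<title>Page {page_num}</title>
-- \t</head>
-- \t<body>
-- {body_html}
-- \t</body>
-- </html>
-- """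
-- ===== SOURCE B (Python) =====
-- def _text_to_xhtml(raw_text: str, page_num: int) -> str:
-- 	"""Convert Tesseract plain text output to simple XHTML."""
--
-- 	def esc(text: str) -> str:
-- 		return text.replace("&", "&amp;").replace("<", "&lt;").replace(">", "&gt;")
--
-- 	lines = raw_text.split("\n")
-- 	n = len(lines)
--
-- 	# Two-pointer run chunking: skip blank lines, then scan each maximal
-- 	# run of non-blank lines and turn the whole run into one paragraph.
-- 	paragraphs: list[str] = []
-- 	i = 0
-- 	while i < n:
-- 		if lines[i].strip() == "":
-- 			i += 1
-- 		else:
-- 			j = i + 1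
-- 			while j < n and lines[j].strip() != "":
-- 				j += 1
-- 			paragraphs.append(" ".join(line.strip() for line in lines[i:j]))
-- 			i = j
--
-- 	body_html = "\n".join(f"\t\t<p>{esc(para)}</p>" for para in paragraphs)
--
-- 	return f"""<?xml version="1.0" encoding="utf-8"?>
-- <html xmlns="http://www.w3.org/1999/xhtml" xml:lang="en">
-- \t<head>
-- \t\t<title>Page {page_num}</title>
-- \t</head>
-- \t<body>
-- {body_html}
-- \t</body>
-- </html>
-- """
-- ===== Notes on version B (the rewrite author's own statement) =====
-- stated objective: alternative
-- what changed: Replaces the flush-on-blank accumulator loop (pending-paragraph list flushed whenever a blank line is seen, plus a trailing flush and a separate escaping pass) with two-pointer run chunking: skip blank lines, scan each maximal non-blank run in an inner loop and emit it directly as one paragraph, escaping inline while building the body.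
import Mathlib
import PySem

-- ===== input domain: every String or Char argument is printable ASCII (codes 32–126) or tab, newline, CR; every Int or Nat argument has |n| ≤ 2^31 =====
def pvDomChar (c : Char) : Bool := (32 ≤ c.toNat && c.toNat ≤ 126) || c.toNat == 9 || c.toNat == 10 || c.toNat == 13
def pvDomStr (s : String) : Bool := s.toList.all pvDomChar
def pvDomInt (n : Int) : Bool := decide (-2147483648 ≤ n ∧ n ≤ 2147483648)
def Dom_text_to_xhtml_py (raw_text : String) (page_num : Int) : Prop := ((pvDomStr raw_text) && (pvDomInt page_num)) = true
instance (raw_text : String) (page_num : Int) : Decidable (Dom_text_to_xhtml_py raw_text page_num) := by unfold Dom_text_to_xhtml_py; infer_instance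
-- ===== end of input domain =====

-- B replaces A's flush-on-blank accumulator loop by two-pointer run chunking with inline
-- escaping (alternative decomposition, same output for every input).

-- ===== PORT A =====
-- escape pass of A: para.replace("&","&amp;").replace("<","&lt;").replace(">","&gt;")
def escA (para : String) : String :=
  PySem.Str.replace (PySem.Str.replace (PySem.Str.replace para "&" "&amp;") "<" "&lt;") ">" "&gt;"

-- A's grouping loop: state (paragraphs, current), flushed on each blank line
def loopA : List String × List String → List String → List String × List String
  | st, [] => st
  | (paras, cur), line :: rest =>
      let stripped := PySem.Str.strip line
      if stripped == "" then
        if !cur.isEmpty then loopA (paras ++ [PySem.Str.join " " cur], []) rest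
        else loopA (paras, cur) rest
      else
        loopA (paras, cur ++ [stripped]) rest

def text_to_xhtml_py (raw_text : String) (page_num : Int) : String :=
  let lines := (PySem.Str.split? raw_text "\n").getD []
  let st := loopA ([], []) lines
  let paragraphs := if !st.2.isEmpty then st.1 ++ [PySem.Str.join " " st.2] else st.1
  let body_parts := paragraphs.foldl (fun acc para => acc ++ ["\t\t<p>" ++ escA para ++ "</p>"]) []
  let body_html := PySem.Str.join "\n" body_parts
  "<?xml version=\"1.0\" encoding=\"utf-8\"?>\n<html xmlns=\"http://www.w3.org/1999/xhtml\" xml:lang=\"en\">\n\t<head>\n\t\t<title>Page "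
    ++ PySem.Int.toStr page_num
    ++ "</title>\n\t</head>\n\t<body>\n" ++ body_html ++ "\n\t</body>\n</html>\n"

-- ===== PORT B =====
def escB (text : String) : String :=
  PySem.Str.replace (PySem.Str.replace (PySem.Str.replace text "&" "&amp;") "<" "&lt;") ">" "&gt;"

-- Source B's two-pointer chunking: a blank head is skipped (i += 1); a non-blank head starts a
-- maximal non-blank run (the inner j-scan = takeWhile, the continuation at i = j = dropWhile)
def chunkB : List String → List String
  | [] => []
  | line :: rest =>
      if PySem.Str.strip line == "" then chunkB rest
      else
        PySem.Str.join " " ((line :: rest.takeWhile (fun x => !(PySem.Str.strip x == ""))).map PySem.Str.strip)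
          :: chunkB (rest.dropWhile (fun x => !(PySem.Str.strip x == "")))
  termination_by ls => ls.length
  decreasing_by
    · simp
    · have := List.length_dropWhile_le (fun x => !(PySem.Str.strip x == "")) rest
      simp
      omega

def text_to_xhtml_py_alt (raw_text : String) (page_num : Int) : String :=
  let paragraphs := chunkB ((PySem.Str.split? raw_text "\n").getD [])
  let body_html := PySem.Str.join "\n" (paragraphs.map (fun para => "\t\t<p>" ++ escB para ++ "</p>"))
  "<?xml version=\"1.0\" encoding=\"utf-8\"?>\n<html xmlns=\"http://www.w3.org/1999/xhtml\" xml:lang=\"en\">\n\t<head>\n\t\t<title>Page "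
    ++ PySem.Int.toStr page_num
    ++ "</title>\n\t</head>\n\t<body>\n" ++ body_html ++ "\n\t</body>\n</html>\n"

-- ===== PRECONDITION & SPEC =====
def Spec_text_to_xhtml_py (raw_text : String) (page_num : Int) (out : String) : Prop := out = text_to_xhtml_py_alt raw_text page_num
instance (raw_text : String) (page_num : Int) (out : String) : Decidable (Spec_text_to_xhtml_py raw_text page_num out) := by unfold Spec_text_to_xhtml_py; infer_instance

-- ===== CLAIM (what is proved, stated in full; the proofs are below) =====
def Claim_equal_text_to_xhtml_py : Prop := ∀ (raw_text : String) (page_num : Int), Dom_text_to_xhtml_py raw_text page_num → Spec_text_to_xhtml_py raw_text page_num (text_to_xhtml_py raw_text page_num)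

-- ===== LEMMAS AND PROOFS =====

-- A's loop, flushed at the end, computes the same paragraph list as B's run chunking:
-- the pending accumulator `cur` is exactly the stripped prefix of the current non-blank run.
-- unfolding equation for loopA on a cons cell
theorem loopA_cons (paras cur : List String) (l : String) (rest : List String) :
    loopA (paras, cur) (l :: rest)
      = if PySem.Str.strip l == "" then
          (if !cur.isEmpty then loopA (paras ++ [PySem.Str.join " " cur], []) rest
           else loopA (paras, cur) rest)
        else loopA (paras, cur ++ [PySem.Str.strip l]) rest := rfl

-- A's loop, flushed at the end, computes the same paragraph list as B's run chunking:
-- the pending accumulator `cur` is exactly the stripped prefix of the current non-blank run.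
theorem loopA_eq_chunkB : ∀ (ls paras cur : List String),
    (if !(loopA (paras, cur) ls).2.isEmpty
      then (loopA (paras, cur) ls).1 ++ [PySem.Str.join " " (loopA (paras, cur) ls).2]
      else (loopA (paras, cur) ls).1)
    = paras ++ (if cur.isEmpty then chunkB ls
        else PySem.Str.join " " (cur ++ (ls.takeWhile (fun x => !(PySem.Str.strip x == ""))).map PySem.Str.strip)
              :: chunkB (ls.dropWhile (fun x => !(PySem.Str.strip x == "")))) := by
  intro ls
  induction ls with
  | nil =>
      intro paras cur
      cases cur with
      | nil => simp [loopA, chunkB]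
      | cons c cs => simp [loopA, chunkB]
  | cons l rest ih =>
      intro paras cur
      by_cases hb : PySem.Str.strip l == ""
      · -- blank head
        cases cur with
        | nil =>
            rw [loopA_cons, if_pos hb]
            simp only [List.isEmpty_nil, Bool.not_true, Bool.false_eq_true, if_false]
            rw [ih paras []]
            simp [chunkB, hb]
        | cons c cs =>
            rw [loopA_cons, if_pos hb]
            simp only [List.isEmpty_cons, Bool.not_false, if_true]
            rw [ih (paras ++ [PySem.Str.join " " (c :: cs)]) []]
            simp [chunkB, hb]
      · -- non-blank head
        rw [loopA_cons, if_neg hb]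
        rw [ih paras (cur ++ [PySem.Str.strip l])]
        cases cur with
        | nil =>
            simp [chunkB, hb]
        | cons c cs =>
            simp [hb]

-- ===== VERDICT (by name: the statement is the Claim_ definition above) =====
theorem text_to_xhtml_py_spec : Claim_equal_text_to_xhtml_py := by
  intro raw_text page_num _
  unfold Spec_text_to_xhtml_py text_to_xhtml_py text_to_xhtml_py_alt
  have h := loopA_eq_chunkB ((PySem.Str.split? raw_text "\n").getD []) [] []
  simp only [List.isEmpty_nil, List.nil_append] at h
  simp only [h, PySem.List.foldl_append_singleton_eq_map]
  rfl
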